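-- pv_equiv track=rewrite | github.com/gitpdg/PSC | MATSim_Input/plans/trip_generation.py | fix_schedule
-- ===== SOURCE A (Python) =====
-- def fix_schedule(person):
--     #When the origin of a trip isn't known, it is set at None. This function fixes this
--     #issue and verifies that a schedule is coherent.
--     person2=[]
--     for trip in person:
--         person2.append([item for item in trip])
--     person2[0][0]="home"
--     for i in range(1,len(person2)):
--         person2[i][0]=person2[i-1][3]
--     person=[tuple(trip) for trip in person2]
--     return person
-- ===== SOURCE B (Python) =====
-- def fix_schedule(person):
--     # Recursively thread the running origin through the trip list: each call
--     # emits one fixed trip and passes its destination onward as the next origin.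
--     def go(origin, trips):
--         if not trips:
--             return []
--         first, rest = trips[0], trips[1:]
--         return [(origin,) + tuple(first)[1:]] + go(first[3], rest)
--     return go("home", person)
-- ===== Notes on version B (the rewrite author's own statement) =====
-- stated objective: simpler
-- what changed: Replaces A's two-phase copy-to-lists-then-mutate-in-place pass (indexed writes person2[i][0] = person2[i-1][3], then re-tupling) by a pure recursion that threads the running origin as an accumulator, emitting each fixed trip directly with no copy, no mutation and no indexing. Pre_ excludes the empty list, where A raises IndexError at person2[0][0] (B's recursion returns []).
-- outside the precondition, e.g. on fix_schedule([]): A raises IndexError, B returns []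
import Mathlib
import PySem

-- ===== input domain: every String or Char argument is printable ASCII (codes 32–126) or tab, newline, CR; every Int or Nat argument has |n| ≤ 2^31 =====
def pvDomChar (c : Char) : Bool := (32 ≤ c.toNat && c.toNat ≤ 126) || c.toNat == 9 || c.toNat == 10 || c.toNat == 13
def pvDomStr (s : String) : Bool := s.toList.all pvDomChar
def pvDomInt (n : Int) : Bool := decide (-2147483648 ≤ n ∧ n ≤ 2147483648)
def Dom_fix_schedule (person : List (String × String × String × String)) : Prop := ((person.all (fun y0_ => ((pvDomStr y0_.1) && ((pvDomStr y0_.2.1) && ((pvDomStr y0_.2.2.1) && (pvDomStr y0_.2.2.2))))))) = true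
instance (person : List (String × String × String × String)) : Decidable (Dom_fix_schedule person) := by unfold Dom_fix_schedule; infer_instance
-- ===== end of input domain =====

-- B replaces A's copy-then-mutate-in-place two phases by a pure recursion threading the running origin; objective: simpler.


-- ===== PORT A =====
-- person2 = copy of person; person2[0][0] = "home"; for i in range(1, len): person2[i][0] = person2[i-1][3]; re-tuple.
def fix_schedule (person : List (String × String × String × String)) : List (String × String × String × String) :=
  let person2 := person.map (fun trip => trip)      -- person2.append([item for item in trip])
  let person2 := person2.modify 0 (fun t => ("home", t.2))   -- person2[0][0] = "home" (IndexError on [] excluded by Pre_)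
  let person2 := (PySem.List.pyRange 1 (person2.length : Int) 1).foldl
    (fun acc i =>
      acc.modify i.toNat (fun t => ((PySem.List.pyGetD acc (i - 1) default).2.2.2, t.2))) person2
  person2.map (fun trip => trip)                    -- [tuple(trip) for trip in person2]

-- ===== PORT B =====
-- go(origin, trips): emit (origin,)+first[1:] and recurse with first[3] as the next origin.
def fix_schedule_go (origin : String) : List (String × String × String × String) → List (String × String × String × String)
  | [] => []
  | first :: rest => (origin, first.2) :: fix_schedule_go first.2.2.2 rest

def fix_schedule_alt (person : List (String × String × String × String)) : List (String × String × String × String) :=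
  fix_schedule_go "home" person

-- ===== PRECONDITION & SPEC =====
-- Pre_ excludes [] only: there A raises IndexError at person2[0][0] (B's recursion happens to return []).
def Pre_fix_schedule (person : List (String × String × String × String)) : Prop := person ≠ []
instance (person : List (String × String × String × String)) : Decidable (Pre_fix_schedule person) := by unfold Pre_fix_schedule; infer_instance
def pvWitness_fix_schedule : (List (String × String × String × String)) := [("", "a", "b", "c"), ("", "d", "e", "f")]

def Spec_fix_schedule (person : List (String × String × String × String)) (out : List (String × String × String × String)) : Prop := out = fix_schedule_alt person
instance (person : List (String × String × String × String)) (out : List (String × String × String × String)) : Decidable (Spec_fix_schedule person out) := by unfold Spec_fix_schedule; infer_instance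

-- ===== CLAIM (what is proved, stated in full; the proofs are below) =====
def Claim_equal_fix_schedule : Prop := ∀ (person : List (String × String × String × String)), Dom_fix_schedule person → Pre_fix_schedule person → Spec_fix_schedule person (fix_schedule person)

-- ===== LEMMAS AND PROOFS =====

theorem pvModify_append_cons {α : Type} (pre : List α) (x : α) (xs : List α) (f : α → α) :
    (pre ++ x :: xs).modify pre.length f = pre ++ f x :: xs := by
  induction pre with
  | nil => rfl
  | cons p ps ih => simpa [List.modify] using ih

theorem pvGet_append_last {α : Type} [Inhabited α] (pre : List α) (xs : List α) (h : pre ≠ []) :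
    PySem.List.pyGetD (pre ++ xs) ((pre.length : Int) - 1) default = pre.getLast h := by
  have h1 : (0:Int) ≤ (pre.length : Int) - 1 := by
    have := List.length_pos_iff.mpr h; omega
  have h2 : (pre.length : Int) - 1 < (((pre ++ xs).length : Int)) := by
    simp only [List.length_append]; omega
  rw [PySem.List.pyGetD_eq_getElem _ default h1 h2]
  have hl : ((pre.length : Int) - 1).toNat = pre.length - 1 := by omega
  have hlt : pre.length - 1 < pre.length := by
    have := List.length_pos_iff.mpr h; omega
  simp only [hl]
  rw [List.getElem_append_left hlt, List.getLast_eq_getElem]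

theorem pvLoop (rest pre : List (String × String × String × String)) (h : pre ≠ []) :
    (PySem.List.pyRange (pre.length : Int) ((pre.length + rest.length : Nat) : Int) 1).foldl
      (fun acc i =>
        acc.modify i.toNat (fun t => ((PySem.List.pyGetD acc (i - 1) default).2.2.2, t.2)))
      (pre ++ rest)
    = pre ++ fix_schedule_go ((pre.getLast h).2.2.2) rest := by
  induction rest generalizing pre with
  | nil =>
    rw [PySem.List.pyRange_one_eq_nil (by simp)]
    simp [fix_schedule_go]
  | cons r rs ih =>
    rw [PySem.List.pyRange_one_cons (by simp only [List.length_cons]; omega)]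
    simp only [List.foldl_cons]
    rw [pvGet_append_last pre (r :: rs) h]
    have htn : ((pre.length : Int)).toNat = pre.length := by omega
    rw [htn, pvModify_append_cons]
    have hkey := ih (pre ++ [((pre.getLast h).2.2.2, r.2)]) (by simp)
    have hlen : ((pre ++ [((pre.getLast h).2.2.2, r.2)]).length : Int) = (pre.length : Int) + 1 := by
      simp
    have hlen2 : (((pre ++ [((pre.getLast h).2.2.2, r.2)]).length + rs.length : Nat) : Int)
        = ((pre.length + (r :: rs).length : Nat) : Int) := by
      simp; push_cast; omega
    rw [hlen, hlen2, List.append_assoc] at hkey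
    simp only [List.singleton_append] at hkey
    rw [hkey]
    have hgl : (pre ++ [((pre.getLast h).2.2.2, r.2)]).getLast (by simp)
        = ((pre.getLast h).2.2.2, r.2) := by
      simp
    rw [hgl]
    simp [fix_schedule_go]

-- ===== VERDICT (by name: the statement is the Claim_ definition above) =====
theorem fix_schedule_spec : Claim_equal_fix_schedule := by
  intro person _ hpre
  unfold Spec_fix_schedule fix_schedule fix_schedule_alt
  match person with
  | [] => exact absurd rfl hpre
  | t0 :: rest =>
    simp only [List.map_id_fun', id]
    rw [show (t0 :: rest).modify 0 (fun t => ("home", t.2)) = ("home", t0.2) :: rest from rfl]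
    have hloop := pvLoop rest [("home", t0.2)] (by simp)
    simp only [List.length_cons, List.length_nil, List.singleton_append,
      List.getLast_singleton, Nat.zero_add, Nat.add_comm 1 rest.length, Nat.cast_one] at hloop ⊢
    rw [hloop]
    rfl
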